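-- pv_equiv track=rewrite | github.com/KaayZouee/test-archive | test-archive/NNLT25/bai-35/bai-35.py | CP_counter
-- ===== SOURCE A (Python) =====
-- def CP_counter(S):
--     cnt = 0
--     i = 0
--     num = []
--     while cnt <= S:
--         num.append((i+1)**2)
--         cnt += len(str(num[i]))
--         i += 1
--
--     sep_digi = []
--     for number in num:
--         for indi_num in str(number):
--             sep_digi.append(indi_num)
--
--     return sep_digi[S-1]
-- ===== SOURCE B (Python) =====
-- def CP_counter(S):
--     # One pass with a running digit count; no lists are built.
--     cnt = 0
--     k = 1
--     while True:
--         s = str(k * k)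
--         if cnt + len(s) >= S:
--             return s[S - 1 - cnt]
--         cnt += len(s)
--         k += 1
-- ===== Notes on version B (the rewrite author's own statement) =====
-- stated objective: faster
-- what changed: B replaces A's three phases (build a list of squares, expand it into a full per-digit list of ~S characters, then index) by a single streaming loop that keeps only a running digit count and indexes directly into the one square's string that covers position S, using O(1) memory.
import Mathlib
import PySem

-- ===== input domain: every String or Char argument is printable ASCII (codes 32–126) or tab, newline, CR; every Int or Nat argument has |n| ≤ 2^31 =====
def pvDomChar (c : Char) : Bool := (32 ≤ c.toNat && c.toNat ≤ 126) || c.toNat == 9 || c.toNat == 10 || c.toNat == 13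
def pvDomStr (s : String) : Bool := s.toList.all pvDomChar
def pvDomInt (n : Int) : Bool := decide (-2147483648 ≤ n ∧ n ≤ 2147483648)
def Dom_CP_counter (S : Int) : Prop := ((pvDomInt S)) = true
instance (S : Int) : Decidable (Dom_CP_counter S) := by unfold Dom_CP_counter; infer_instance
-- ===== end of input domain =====

-- B replaces A's build-list / expand-to-digit-list / index phases by one streaming loop with a
-- running digit count and O(1) memory (measured constant-factor faster); return values only.

-- fuel-monotone digit accumulator (used for: str(n) is never empty)
theorem pvToDigitsCore_len (b fuel n : Nat) (ds : List Char) :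
    ds.length ≤ (Nat.toDigitsCore b fuel n ds).length := by
  induction fuel generalizing n ds with
  | zero => simp [Nat.toDigitsCore]
  | succ f ih =>
    rw [Nat.toDigitsCore]
    split
    · simp
    · calc ds.length ≤ ((n % b).digitChar :: ds).length := by simp
        _ ≤ _ := ih _ _

theorem pvToDigits_ne_nil (n : Nat) : Nat.toDigits 10 n ≠ [] := by
  rw [Nat.toDigits, Nat.toDigitsCore]
  split
  · simp
  · intro hc
    have h2 := pvToDigitsCore_len 10 n (n / 10) [(n % 10).digitChar]
    rw [hc] at h2
    simp at h2

-- str(n) is never empty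
theorem pvToChars_ne_nil (n : Int) : PySem.Int.toChars n ≠ [] := by
  unfold PySem.Int.toChars
  split
  · simp
  · exact pvToDigits_ne_nil n.toNat

-- ===== PORT A =====
-- while cnt <= S: num.append((i+1)**2); cnt += len(str(num[i])); i += 1
def pvALoop (S cnt i : Int) (num : List Int) : List Int :=
  if cnt ≤ S then
    let num' := num ++ [(i + 1) ^ 2]
    pvALoop S (cnt + PySem.List.len (PySem.Int.toChars (PySem.List.pyGetD num' i 0))) (i + 1) num'
  else num
termination_by (S + 1 - cnt).toNat
decreasing_by
  have h1 : (PySem.Int.toChars (PySem.List.pyGetD (num ++ [(i + 1) ^ 2]) i 0)).length ≥ 1 := by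
    have := pvToChars_ne_nil (PySem.List.pyGetD (num ++ [(i + 1) ^ 2]) i 0)
    cases h : PySem.Int.toChars (PySem.List.pyGetD (num ++ [(i + 1) ^ 2]) i 0) with
    | nil => exact absurd h this
    | cons a t => simp
  simp only [PySem.List.len_eq]
  omega

-- for number in num: for indi_num in str(number): sep_digi.append(indi_num)
-- (Python iterates a str as length-1 strings; ported exactly as the characters, the returned
--  length-1 string is rebuilt at the end)
def pvASep (num : List Int) : List Char :=
  num.foldl (fun acc number => (PySem.Int.toChars number).foldl (fun a c => a ++ [c]) acc) []

def CP_counter (S : Int) : String :=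
  let num := pvALoop S 0 0 []
  let sep_digi := pvASep num
  match PySem.List.pyGet? sep_digi (S - 1) with
  | some c => String.ofList [c]
  | none => ""   -- IndexError (only when S < 0), excluded by Pre_

-- ===== PORT B =====
-- cnt = 0; k = 1; while True: s = str(k*k); if cnt+len(s) >= S: return s[S-1-cnt]; cnt += len(s); k += 1
def pvBLoop (S cnt k : Int) : String :=
  let s := PySem.Int.toChars (k * k)
  if cnt + PySem.List.len s ≥ S then
    match PySem.List.pyGet? s (S - 1 - cnt) with
    | some c => String.ofList [c]
    | none => ""   -- IndexError (only when S < 0), excluded by Pre_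
  else pvBLoop S (cnt + PySem.List.len s) (k + 1)
termination_by (S - cnt).toNat
decreasing_by
  have h1 : (PySem.Int.toChars (k * k)).length ≥ 1 := by
    have := pvToChars_ne_nil (k * k)
    cases h : PySem.Int.toChars (k * k) with
    | nil => exact absurd h this
    | cons a t => simp
  simp_all only [PySem.List.len_eq, not_le]
  omega

def CP_counter_alt (S : Int) : String := pvBLoop S 0 1

-- ===== PRECONDITION & SPEC =====
-- For S < 0 A raises IndexError (the digit list is empty); excluded. A returns on every S ≥ 0.
def Pre_CP_counter (S : Int) : Prop := 0 ≤ S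
instance (S : Int) : Decidable (Pre_CP_counter S) := by unfold Pre_CP_counter; infer_instance
def pvWitness_CP_counter : Int := (5)

def Spec_CP_counter (S : Int) (out : String) : Prop := out = CP_counter_alt S
instance (S : Int) (out : String) : Decidable (Spec_CP_counter S out) := by unfold Spec_CP_counter; infer_instance

-- ===== CLAIM (what is proved, stated in full; the proofs are below) =====
def Claim_equal_CP_counter : Prop := ∀ (S : Int), Dom_CP_counter S → Pre_CP_counter S → Spec_CP_counter S (CP_counter S)

-- ===== LEMMAS AND PROOFS =====

theorem pvFoldlSingleton (cs : List Char) (acc : List Char) :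
    cs.foldl (fun a c => a ++ [c]) acc = acc ++ cs := by
  induction cs generalizing acc with
  | nil => simp
  | cons c t ih => simp [ih]

theorem pvASep_go (num : List Int) (acc : List Char) :
    num.foldl (fun acc number => (PySem.Int.toChars number).foldl (fun a c => a ++ [c]) acc) acc
      = acc ++ num.flatMap PySem.Int.toChars := by
  induction num generalizing acc with
  | nil => simp
  | cons n t ih =>
    rw [List.foldl_cons, pvFoldlSingleton, ih]
    simp

theorem pvASep_eq_flatMap (num : List Int) : pvASep num = num.flatMap PySem.Int.toChars := by
  rw [pvASep, pvASep_go]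
  simp

theorem pvALoop_prefix (S cnt i : Int) (num : List Int) :
    ∃ t, pvALoop S cnt i num = num ++ t := by
  induction cnt, i, num using pvALoop.induct (S := S) with
  | case1 cnt i num h num' ih =>
    obtain ⟨t, ht⟩ := ih
    rw [pvALoop, if_pos h]
    exact ⟨(i + 1) ^ 2 :: t, by simpa [num'] using ht⟩
  | case2 cnt i num h =>
    rw [pvALoop, if_neg h]
    exact ⟨[], by simp⟩

theorem pvChars_len_pos (n : Int) : 1 ≤ (PySem.Int.toChars n).length := by
  have h := pvToChars_ne_nil n
  cases hc : PySem.Int.toChars n with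
  | nil => exact absurd hc h
  | cons a t => simp

theorem pvMainAux (S : Int) (hS : 1 ≤ S) :
    ∀ fuel cnt i (num : List Int), (S - cnt).toNat ≤ fuel → 0 ≤ cnt → cnt < S →
      ((num.flatMap PySem.Int.toChars).length : Int) = cnt →
      (num.length : Int) = i →
      (match PySem.List.pyGet? ((pvALoop S cnt i num).flatMap PySem.Int.toChars) (S - 1) with
        | some c => String.ofList [c]
        | none => "") = pvBLoop S cnt (i + 1) := by
  intro fuel
  induction fuel with
  | zero => intro cnt i num hn h0 hlt _ _; omega
  | succ m ih =>
    intro cnt i num hn h0 hlt hflat hi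
    have hget : PySem.List.pyGetD (num ++ [(i + 1) ^ 2]) i 0 = (i + 1) ^ 2 := by
      subst hi
      rw [PySem.List.pyGetD_natCast]
      simp
    have hslen := pvChars_len_pos ((i + 1) ^ 2)
    have hkk : (i + 1) * (i + 1) = (i + 1) ^ 2 := by ring
    rw [pvALoop, if_pos hlt.le]
    rw [pvBLoop]
    simp only [hget, hkk, PySem.List.len_eq]
    by_cases hstop : cnt + ((PySem.Int.toChars ((i + 1) ^ 2)).length : Int) ≥ S
    · rw [if_pos hstop]
      obtain ⟨t, ht⟩ := pvALoop_prefix S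
        (cnt + ((PySem.Int.toChars ((i + 1) ^ 2)).length : Int)) (i + 1) (num ++ [(i + 1) ^ 2])
      rw [ht]
      have hflatall : ((num ++ [(i + 1) ^ 2]) ++ t).flatMap PySem.Int.toChars
          = num.flatMap PySem.Int.toChars
            ++ (PySem.Int.toChars ((i + 1) ^ 2) ++ t.flatMap PySem.Int.toChars) := by
        simp
      rw [hflatall]
      have hidx : (S - 1).toNat = (num.flatMap PySem.Int.toChars).length + (S - 1 - cnt).toNat := by
        omega
      have eA : PySem.List.pyGet?
          (num.flatMap PySem.Int.toChars
            ++ (PySem.Int.toChars ((i + 1) ^ 2) ++ t.flatMap PySem.Int.toChars)) (S - 1)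
          = (PySem.Int.toChars ((i + 1) ^ 2))[(S - 1 - cnt).toNat]? := by
        rw [PySem.List.pyGet?_of_nonneg _ (show (0:Int) ≤ S - 1 by omega)]
        rw [hidx, List.getElem?_append_right (by omega)]
        rw [show (num.flatMap PySem.Int.toChars).length + (S - 1 - cnt).toNat
            - (num.flatMap PySem.Int.toChars).length = (S - 1 - cnt).toNat by omega]
        rw [List.getElem?_append_left (by omega)]
      have eB : PySem.List.pyGet? (PySem.Int.toChars ((i + 1) ^ 2)) (S - 1 - cnt)
          = (PySem.Int.toChars ((i + 1) ^ 2))[(S - 1 - cnt).toNat]? :=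
        PySem.List.pyGet?_of_nonneg _ (by omega)
      rw [eA, eB]
    · rw [if_neg hstop]
      apply ih
      · omega
      · omega
      · omega
      · have h2 : (List.flatMap PySem.Int.toChars (num ++ [(i + 1) ^ 2])).length
            = (num.flatMap PySem.Int.toChars).length + (PySem.Int.toChars ((i + 1) ^ 2)).length := by
          simp
        omega
      · have h3 : (num ++ [(i + 1) ^ 2]).length = num.length + 1 := by simp
        omega

theorem pvMain (S : Int) (hS : 1 ≤ S) (cnt i : Int) (num : List Int)
    (h0 : 0 ≤ cnt) (hlt : cnt < S)
    (hflat : ((num.flatMap PySem.Int.toChars).length : Int) = cnt)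
    (hi : (num.length : Int) = i) :
    (match PySem.List.pyGet? ((pvALoop S cnt i num).flatMap PySem.Int.toChars) (S - 1) with
      | some c => String.ofList [c]
      | none => "") = pvBLoop S cnt (i + 1) :=
  pvMainAux S hS (S - cnt).toNat cnt i num le_rfl h0 hlt hflat hi

-- ===== VERDICT (by name: the statement is the Claim_ definition above) =====
theorem CP_counter_spec : Claim_equal_CP_counter := by
  intro S _ hPre
  unfold Pre_CP_counter at hPre
  unfold Spec_CP_counter CP_counter CP_counter_alt
  simp only [pvASep_eq_flatMap]
  rcases (by omega : S = 0 ∨ 1 ≤ S) with h0 | h1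
  · subst h0
    have hA : pvALoop 0 0 0 [] = [1] := by
      rw [pvALoop, if_pos (by norm_num), pvALoop, if_neg (by decide)]
      decide
    have hB : pvBLoop 0 0 1 = "1" := by
      rw [pvBLoop, if_pos (by decide)]
      decide
    rw [hA, hB]
    decide
  · have h := pvMain S h1 0 0 [] le_rfl h1 (by simp) (by simp)
    simpa using h
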